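-- pv_equiv track=rewrite | github.com/varun442/lead-discovery-agent | lead_agent/agent.py | _dominant_hunter_pattern
-- ===== SOURCE A (Python) =====
-- from collections import Counter, defaultdict
--
-- def _pattern_for_record(record: dict) -> str | None:
--     email = (record.get("value") or "").strip().lower()
--     first = (record.get("first_name") or "").strip().lower()
--     last = (record.get("last_name") or "").strip().lower()
--     if not email or not first or not last or "@" not in email:
--         return None
--
--     local = email.split("@", 1)[0]
--     if local == f"{first}.{last}":
--         return "first.last"
--     if local == f"{first[0]}{last}":
--         return "flast"
--     if local == first:
--         return "first"
--     return None
--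
-- def _dominant_hunter_pattern(records: list[dict]) -> tuple[str | None, dict | None]:
--     counts: Counter[str] = Counter()
--     example_by_pattern: dict[str, dict] = {}
--
--     for rec in records:
--         pattern = _pattern_for_record(rec)
--         if not pattern:
--             continue
--         counts[pattern] += 1
--         if pattern not in example_by_pattern:
--             example_by_pattern[pattern] = rec
--
--     if not counts:
--         return None, None
--
--     dominant = counts.most_common(1)[0][0]
--     return dominant, example_by_pattern.get(dominant)
-- ===== SOURCE B (Python) =====
-- def _pattern_for_record(record: dict) -> str | None:
--     email = (record.get("value") or "").strip().lower()
--     first = (record.get("first_name") or "").strip().lower()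
--     last = (record.get("last_name") or "").strip().lower()
--     if not email or not first or not last or "@" not in email:
--         return None
--
--     local = email.split("@", 1)[0]
--     if local == f"{first}.{last}":
--         return "first.last"
--     if local == f"{first[0]}{last}":
--         return "flast"
--     if local == first:
--         return "first"
--     return None
--
--
-- def _dominant_hunter_pattern(records: list[dict]) -> tuple[str | None, dict | None]:
--     # Sort-then-scan: tag matching records with (pattern, position), sort the tags by
--     # pattern (stable, so each group keeps original order and starts with its first
--     # record), compress the sorted list into runs, and pick the run minimising
--     # (-count, first position) — which is most_common's winner (max count, first seen).
--     tagged = [(p, i, rec) for i, rec in enumerate(records)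
--               if (p := _pattern_for_record(rec))]
--     if not tagged:
--         return None, None
--     tagged.sort(key=lambda t: t[0])
--     runs = []  # [count, first position, pattern, first record]
--     for p, i, rec in tagged:
--         if runs and runs[-1][2] == p:
--             runs[-1][0] += 1
--         else:
--             runs.append([1, i, p, rec])
--     best = min(runs, key=lambda r: (-r[0], r[1]))
--     return best[2], best[3]
-- ===== Notes on version B (the rewrite author's own statement) =====
-- stated objective: alternative
-- what changed: Replaces A's hash counting (Counter + first-example dict + most_common) by sort-then-scan: tag matching records with (pattern, position), stable-sort the tags by pattern, compress the sorted list into contiguous runs, and take the run minimising (-count, first position), whose head record is the example.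
import Mathlib
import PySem

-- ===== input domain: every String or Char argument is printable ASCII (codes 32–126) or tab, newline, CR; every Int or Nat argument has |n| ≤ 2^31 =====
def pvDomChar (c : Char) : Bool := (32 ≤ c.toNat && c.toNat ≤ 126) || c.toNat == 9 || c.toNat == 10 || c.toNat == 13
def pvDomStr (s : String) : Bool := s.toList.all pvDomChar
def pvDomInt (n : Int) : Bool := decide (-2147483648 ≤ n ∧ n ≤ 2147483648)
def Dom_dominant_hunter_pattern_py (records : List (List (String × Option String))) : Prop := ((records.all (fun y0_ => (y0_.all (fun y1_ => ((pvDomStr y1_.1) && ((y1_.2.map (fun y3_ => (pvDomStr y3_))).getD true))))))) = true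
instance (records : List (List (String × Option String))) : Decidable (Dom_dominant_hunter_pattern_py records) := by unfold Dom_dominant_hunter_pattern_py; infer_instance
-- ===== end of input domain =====

-- B replaces A's hash counting (Counter + example dict + most_common) by sort-then-scan:
-- tag matching records with (pattern, position), stable-sort by pattern, compress into runs,
-- pick the run minimising (-count, first position) (objective: alternative).


-- ===== PORT A =====
-- record.get(k): first matching key (dict as assoc list); '(… or "")' maps a missing key or None to "" ("" stays "")
def pvGetStr (r : List (String × Option String)) (k : String) : String :=
  (((r.find? (fun p => p.1 == k)).bind (fun p => p.2)).getD "")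

-- _pattern_for_record, shared verbatim by A and B (both Pythons call the same helper)
def patternFor (r : List (String × Option String)) : Option String :=
  let email := PySem.Chars.lower (PySem.Chars.strip (pvGetStr r "value").toList)
  let first := PySem.Chars.lower (PySem.Chars.strip (pvGetStr r "first_name").toList)
  let last  := PySem.Chars.lower (PySem.Chars.strip (pvGetStr r "last_name").toList)
  if email = [] ∨ first = [] ∨ last = [] ∨ PySem.Chars.isIn ['@'] email = false then none
  else
    -- email.split("@", 1)[0]: the separator is nonempty and the split list nonempty, so the defaults are unreachable
    let loc := ((PySem.Chars.splitMax? email ['@'] 1).getD []).headD []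
    if loc = first ++ '.' :: last then some "first.last"
    -- f"{first[0]}{last}": first ≠ [] here, so pyGet? first 0 is some
    else if loc = ((PySem.List.pyGet? first 0).elim [] (fun c => [c])) ++ last then some "flast"
    else if loc = first then some "first"
    else none

def dominant_hunter_pattern_py (records : List (List (String × Option String))) : Option String × (Option (List (String × Option String))) :=
  let st := records.foldl
    (fun (s : PySem.Dict String Int × PySem.Dict String (List (String × Option String))) rec =>
      match patternFor rec with
      | none => s
      | some p =>  -- 'if not pattern: continue' also skips the (unreachable) empty pattern
        if p = "" then s
        else (s.1.modify p 0 (· + 1), if s.2.contains p then s.2 else s.2.insert p rec))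
    (PySem.Dict.empty, PySem.Dict.empty)
  if st.1.items.isEmpty then (none, none)
  else
    -- counts.most_common(1)[0][0]: the first key of maximal count in insertion order
    match PySem.List.max? st.1.items (fun q => q.2) with
    | some q => (some q.1, st.2.get? q.1)
    | none => (none, none)

-- ===== PORT B =====
def dominant_hunter_pattern_py_alt (records : List (List (String × Option String))) : Option String × (Option (List (String × Option String))) :=
  -- tagged = [(p, i, rec) for i, rec in enumerate(records) if (p := _pattern_for_record(rec))]
  let tagged : List (String × Int × List (String × Option String)) :=
    (PySem.List.enumerate records 0).filterMap (fun q => (patternFor q.2).map (fun p => (p, q.1, q.2)))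
  if tagged.isEmpty then (none, none)
  else
    -- tagged.sort(key=lambda t: t[0])  (stable)
    let sortedT := PySem.List.sorted tagged (fun t => t.1) false
    -- run compression: runs[-1][0] += 1 / runs.append([1, i, p, rec])
    let runs := sortedT.foldl
      (fun (rs : List (Int × Int × String × List (String × Option String))) t =>
        match rs.getLast? with
        | some r => if r.2.2.1 == t.1 then rs.dropLast ++ [(r.1 + 1, r.2.1, r.2.2.1, r.2.2.2)]
                    else rs ++ [((1 : Int), t.2.1, t.1, t.2.2)]
        | none => rs ++ [((1 : Int), t.2.1, t.1, t.2.2)]) []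
    -- best = min(runs, key=lambda r: (-r[0], r[1]))   (runs is nonempty here; none is unreachable)
    match PySem.List.min2? runs (fun r => -r.1) (fun r => r.2.1) with
    | some b => (some b.2.2.1, some b.2.2.2)
    | none => (none, none)

-- ===== PRECONDITION & SPEC =====
def Spec_dominant_hunter_pattern_py (records : List (List (String × Option String))) (out : Option String × (Option (List (String × Option String)))) : Prop := out = dominant_hunter_pattern_py_alt records
instance (records : List (List (String × Option String))) (out : Option String × (Option (List (String × Option String)))) : Decidable (Spec_dominant_hunter_pattern_py records out) := by unfold Spec_dominant_hunter_pattern_py; infer_instance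

-- ===== CLAIM (what is proved, stated in full; the proofs are below) =====
def Claim_equal_dominant_hunter_pattern_py : Prop := ∀ (records : List (List (String × Option String))), Dom_dominant_hunter_pattern_py records → Spec_dominant_hunter_pattern_py records (dominant_hunter_pattern_py records)

-- ===== LEMMAS AND PROOFS =====

-- the tag a record contributes (A-side view, no index)
def pvTag (r : List (String × Option String)) : Option (String × List (String × Option String)) :=
  (patternFor r).map (fun p => (p, r))

-- the run summary of a homogeneous group
def pvSum (g : List (String × Int × List (String × Option String))) : Int × Int × String × List (String × Option String) :=
  match g with
  | [] => (0, 0, "", [])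
  | t :: _ => ((g.length : Int), t.2.1, t.1, t.2.2)

-- the run summary of pattern p's group inside l
def pvSumP (l : List (String × Int × List (String × Option String))) (p : String) : Int × Int × String × List (String × Option String) :=
  pvSum (l.filter (fun t => t.1 == p))

theorem patternFor_ne_empty (r : List (String × Option String)) : patternFor r ≠ some "" := by
  unfold patternFor
  dsimp only
  split_ifs <;> simp

theorem patternFor_mem (r : List (String × Option String)) (p : String) (h : patternFor r = some p) :
    p = "first.last" ∨ p = "flast" ∨ p = "first" := by
  unfold patternFor at h
  dsimp only at h
  split_ifs at h <;> simp_all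

theorem foldA_eq (records : List (List (String × Option String)))
    (c : PySem.Dict String Int) (e : PySem.Dict String (List (String × Option String))) :
    records.foldl
      (fun (s : PySem.Dict String Int × PySem.Dict String (List (String × Option String))) rec =>
        match patternFor rec with
        | none => s
        | some p =>
          if p = "" then s
          else (s.1.modify p 0 (· + 1), if s.2.contains p then s.2 else s.2.insert p rec)) (c, e)
      = ((records.filterMap pvTag).foldl (fun c q => c.modify q.1 0 (· + 1)) c,
         (records.filterMap pvTag).foldl (fun e q => if e.contains q.1 then e else e.insert q.1 q.2) e) := by
  induction records generalizing c e with
  | nil => simp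
  | cons r t ih =>
    simp only [List.foldl_cons, List.filterMap_cons]
    cases h : patternFor r with
    | none => simp [pvTag, h, ih]
    | some p =>
      have hne : ¬ p = "" := fun hp => patternFor_ne_empty r (hp ▸ h)
      simp [pvTag, h, hne, ih]

theorem exFold_get? (tl : List (String × List (String × Option String)))
    (e : PySem.Dict String (List (String × Option String))) (d : String) :
    (tl.foldl (fun e q => if e.contains q.1 then e else e.insert q.1 q.2) e).get? d
      = ((e.get? d).or ((tl.find? (fun q => q.1 == d)).map (fun q => q.2))) := by
  induction tl generalizing e with
  | nil => cases h : e.get? d <;> simp [h]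
  | cons q t ih =>
    simp only [List.foldl_cons, List.find?_cons]
    by_cases hd : q.1 = d
    · simp only [hd, beq_self_eq_true]
      by_cases hc : e.contains d = true
      · rw [if_pos hc, ih]
        cases h : e.get? d with
        | none =>
          rw [PySem.Dict.get?_eq_none_iff_contains] at h
          rw [h] at hc
          simp at hc
        | some v => simp
      · rw [if_neg hc, ih, PySem.Dict.get?_insert_self]
        have h0 : e.get? d = none := by
          rw [PySem.Dict.get?_eq_none_iff_contains]
          simpa using hc
        simp [h0]
    · have hb : (q.1 == d) = false := beq_eq_false_iff_ne.mpr hd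
      simp only [hb]
      by_cases hc : e.contains q.1 = true
      · rw [if_pos hc, ih]
      · rw [if_neg hc, ih]
        simp [PySem.Dict.get?_insert, Ne.symm hd]

theorem max?_map {α β : Type} (l : List α) (f : α → β) (g : β → Int) :
    PySem.List.max? (l.map f) g = (PySem.List.max? l (fun x => g (f x))).map f := by
  unfold PySem.List.max?
  rw [List.foldl_map]
  have : ∀ (l : List α) (acc : Option α),
      l.foldl (fun a x =>
        match a with
        | none => some (f x)
        | some m => if g m < g (f x) then some (f x) else some m) (acc.map f)
      = (l.foldl (fun a x =>
        match a with
        | none => some x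
        | some m => if g (f m) < g (f x) then some x else some m) acc).map f := by
    intro l
    induction l with
    | nil => intro acc; rfl
    | cons x t ih =>
      intro acc
      cases acc with
      | none => simpa using ih (some x)
      | some m =>
        simp only [Option.map_some, List.foldl_cons]
        by_cases h : g (f m) < g (f x)
        · rw [if_pos h, if_pos h]; exact ih (some x)
        · rw [if_neg h, if_neg h]; exact ih (some m)
  simpa using this l none

-- A's fold characterised as the Counter/max?/find? normal form over the tag list
theorem A_char (records : List (List (String × Option String))) :
    dominant_hunter_pattern_py records
      = (match PySem.List.max? (PySem.List.dedup ((records.filterMap pvTag).map (fun q => q.1)))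
            (fun p => (((records.filterMap pvTag).map (fun q => q.1)).count p : Int)) with
         | some d => (some d, ((records.filterMap pvTag).find? (fun q => q.1 == d)).map (fun q => q.2))
         | none => (none, none)) := by
  unfold dominant_hunter_pattern_py
  rw [foldA_eq]
  have hcnt : ((records.filterMap pvTag).foldl (fun c q => c.modify q.1 0 (· + 1)) PySem.Dict.empty)
      = PySem.Dict.counter ((records.filterMap pvTag).map (fun q => q.1)) := by
    rw [PySem.Dict.counter_eq_foldl, List.foldl_map]
  rw [hcnt]
  dsimp only
  rw [PySem.Dict.items_counter]
  simp only [PySem.List.dedup_eq_ofList]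
  set tl0 := records.filterMap pvTag with htl0
  clear_value tl0
  cases tl0 with
  | nil =>
    simp [PySem.Set.ofList]
    rfl
  | cons q t =>
    have hofl : PySem.Set.ofList ((q :: t).map (fun x => x.1)) ≠ [] := by
      intro hnil
      have hm := (PySem.Set.mem_ofList (y := q.1) (xs := (q :: t).map (fun x => x.1))).mpr (by simp)
      rw [hnil] at hm
      exact absurd hm List.not_mem_nil
    obtain ⟨d, hd⟩ : ∃ d, PySem.List.max? (PySem.Set.ofList ((q :: t).map (fun x => x.1)))
        (fun p => ((((q :: t).map (fun x => x.1)).count p : Int))) = some d := by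
      cases hcase : PySem.List.max? (PySem.Set.ofList ((q :: t).map (fun x => x.1)))
          (fun p => ((((q :: t).map (fun x => x.1)).count p : Int))) with
      | some d => exact ⟨d, rfl⟩
      | none => exact absurd ((PySem.List.max?_eq_none_iff _ _).mp hcase) hofl
    rw [max?_map]
    simp only [hd, Option.map_some]
    rw [if_neg (by simpa [List.isEmpty_iff] using hofl)]
    rw [exFold_get?]
    simp [PySem.Dict.get?_empty]

-- tl0 as projection of tl
theorem tl_proj (records : List (List (String × Option String))) (s : Int) :
    records.filterMap pvTag
      = ((PySem.List.enumerate records s).filterMap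
          (fun q => (patternFor q.2).map (fun p => (p, q.1, q.2)))).map (fun t => (t.1, t.2.2)) := by
  induction records generalizing s with
  | nil => simp [PySem.List.enumerate_nil]
  | cons r t ih =>
    rw [PySem.List.enumerate_cons]
    simp only [List.filterMap_cons]
    cases h : patternFor r with
    | none => simpa [pvTag, h] using ih (s + 1)
    | some p => simpa [pvTag, h] using ih (s + 1)

-- insertBy at the boundary between the kept prefix and the pushed-back suffix
theorem insertBy_boundary {α : Type} (before : α → α → Bool) (x : α) (l1 l2 : List α)
    (h1 : ∀ y ∈ l1, before x y = false) (h2 : ∀ y ∈ l2, before x y = true) :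
    PySem.List.insertBy before x (l1 ++ l2) = l1 ++ x :: l2 := by
  induction l1 with
  | nil =>
    simp only [List.nil_append]
    cases l2 with
    | nil => rfl
    | cons y ys => simp [PySem.List.insertBy, h2 y (by simp)]
  | cons y ys ih =>
    have hy : before x y = false := h1 y (by simp)
    simp only [List.cons_append, PySem.List.insertBy, hy]
    simp only [Bool.false_eq_true, if_false, List.cons.injEq, true_and]
    exact ih (fun z hz => h1 z (by simp [hz]))

-- insertBy at the very end, when nothing must come after x
theorem insertBy_last {α : Type} (before : α → α → Bool) (x : α) (l : List α)
    (h1 : ∀ y ∈ l, before x y = false) :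
    PySem.List.insertBy before x l = l ++ [x] := by
  have h := insertBy_boundary before x l [] h1 (by intro y hy; cases hy)
  simpa using h

-- sorting a list whose keys are among the three pattern literals groups it into the three filters
theorem sort3 (l : List (String × Int × List (String × Option String)))
    (h : ∀ t ∈ l, t.1 = "first.last" ∨ t.1 = "flast" ∨ t.1 = "first") :
    PySem.List.sorted l (fun t => t.1) false
      = l.filter (fun t => t.1 == "first") ++ l.filter (fun t => t.1 == "first.last")
          ++ l.filter (fun t => t.1 == "flast") := by
  rw [PySem.List.sorted_eq_foldl_insertBy]
  induction l using List.reverseRecOn with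
  | nil => simp
  | append_singleton l x ih =>
    rw [List.foldl_append, List.foldl_cons, List.foldl_nil,
        ih (fun z hz => h z (by simp [hz]))]
    simp only [List.filter_append]
    rcases h x (by simp) with hx | hx | hx
    · -- x.1 = "first.last": insert between the "first" block and the "flast" block
      rw [insertBy_boundary _ x _ (l.filter (fun t => t.1 == "flast"))
        (by
          intro y hy
          rcases (List.mem_append.mp hy) with hy1 | hy1
          · have := (List.mem_filter.mp hy1).2
            have hy2 : y.1 = "first" := by simpa using this
            simp only [decide_eq_false_iff_not, hx, hy2]
            simp; try decide
          · have := (List.mem_filter.mp hy1).2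
            have hy2 : y.1 = "first.last" := by simpa using this
            simp only [decide_eq_false_iff_not, hx, hy2]
            simp)
        (by
          intro y hy
          have := (List.mem_filter.mp hy).2
          have hy2 : y.1 = "flast" := by simpa using this
          simp only [decide_eq_true_eq, hx, hy2]
          simp; try decide)]
      simp [hx]
    · -- x.1 = "flast": insert at the very end
      rw [insertBy_last _ x _
        (by
          intro y hy
          rcases (List.mem_append.mp hy) with hy1 | hy1
          · rcases (List.mem_append.mp hy1) with hy2 | hy2
            · have := (List.mem_filter.mp hy2).2
              have hy3 : y.1 = "first" := by simpa using this
              simp only [decide_eq_false_iff_not, hx, hy3]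
              simp; try decide
            · have := (List.mem_filter.mp hy2).2
              have hy3 : y.1 = "first.last" := by simpa using this
              simp only [decide_eq_false_iff_not, hx, hy3]
              simp; try decide
          · have := (List.mem_filter.mp hy1).2
            have hy3 : y.1 = "flast" := by simpa using this
            simp only [decide_eq_false_iff_not, hx, hy3]
            simp)]
      simp [hx]
    · -- x.1 = "first": insert right after the "first" block
      rw [List.append_assoc, insertBy_boundary _ x (l.filter (fun t => t.1 == "first"))
        (l.filter (fun t => t.1 == "first.last") ++ l.filter (fun t => t.1 == "flast"))
        (by
          intro y hy
          have := (List.mem_filter.mp hy).2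
          have hy2 : y.1 = "first" := by simpa using this
          simp only [decide_eq_false_iff_not, hx, hy2]
          simp)
        (by
          intro y hy
          rcases (List.mem_append.mp hy) with hy1 | hy1
          · have := (List.mem_filter.mp hy1).2
            have hy2 : y.1 = "first.last" := by simpa using this
            simp only [decide_eq_true_eq, hx, hy2]
            simp; try decide
          · have := (List.mem_filter.mp hy1).2
            have hy2 : y.1 = "flast" := by simpa using this
            simp only [decide_eq_true_eq, hx, hy2]
            simp; try decide)]
      simp [hx]

-- run compression over a homogeneous block appended to the current last run
theorem runs_bump (g : List (String × Int × List (String × Option String)))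
    (rs : List (Int × Int × String × List (String × Option String)))
    (c i : Int) (p : String) (r : List (String × Option String))
    (hall : ∀ t ∈ g, t.1 = p) :
    g.foldl
      (fun rs t =>
        match rs.getLast? with
        | some r => if r.2.2.1 == t.1 then rs.dropLast ++ [(r.1 + 1, r.2.1, r.2.2.1, r.2.2.2)]
                    else rs ++ [((1 : Int), t.2.1, t.1, t.2.2)]
        | none => rs ++ [((1 : Int), t.2.1, t.1, t.2.2)]) (rs ++ [(c, i, p, r)])
      = rs ++ [((c + g.length), i, p, r)] := by
  induction g generalizing c with
  | nil => simp
  | cons t g' ih =>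
    have ht : t.1 = p := hall t (by simp)
    simp only [List.foldl_cons, List.getLast?_concat, List.dropLast_concat, ht,
      beq_self_eq_true, if_true]
    rw [ih (c + 1) (fun z hz => hall z (by simp [hz]))]
    simp only [List.length_cons]
    have hlen : c + 1 + (g'.length : Int) = c + ((g'.length + 1 : Nat) : Int) := by omega
    rw [hlen]

-- run compression over a homogeneous group starting after foreign runs
theorem runs_group (g : List (String × Int × List (String × Option String)))
    (rs : List (Int × Int × String × List (String × Option String))) (p : String)
    (hall : ∀ t ∈ g, t.1 = p)
    (hrs : ∀ r, rs.getLast? = some r → r.2.2.1 ≠ p) :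
    g.foldl
      (fun rs t =>
        match rs.getLast? with
        | some r => if r.2.2.1 == t.1 then rs.dropLast ++ [(r.1 + 1, r.2.1, r.2.2.1, r.2.2.2)]
                    else rs ++ [((1 : Int), t.2.1, t.1, t.2.2)]
        | none => rs ++ [((1 : Int), t.2.1, t.1, t.2.2)]) rs
      = rs ++ (if g.isEmpty then [] else [pvSum g]) := by
  cases g with
  | nil => simp
  | cons t g' =>
    have ht : t.1 = p := hall t (by simp)
    have hstep : (match rs.getLast? with
        | some r => if r.2.2.1 == t.1 then rs.dropLast ++ [(r.1 + 1, r.2.1, r.2.2.1, r.2.2.2)]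
                    else rs ++ [((1 : Int), t.2.1, t.1, t.2.2)]
        | none => rs ++ [((1 : Int), t.2.1, t.1, t.2.2)])
        = rs ++ [((1 : Int), t.2.1, t.1, t.2.2)] := by
      cases hlast : rs.getLast? with
      | none => rfl
      | some r =>
        have : (r.2.2.1 == t.1) = false := by
          rw [beq_eq_false_iff_ne, ht]
          exact hrs r hlast
        simp [this]
    simp only [List.foldl_cons, hstep]
    rw [runs_bump g' rs 1 t.2.1 t.1 t.2.2 (fun z hz => (hall z (by simp [hz])).trans ht.symm)]
    simp only [List.isEmpty_cons, Bool.false_eq_true, if_false, pvSum, List.length_cons]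
    have hlen : (1 : Int) + (g'.length : Int) = ((g'.length + 1 : Nat) : Int) := by omega
    rw [hlen]

-- min2? characterisation: the result is a lex minimum
theorem min2?_not_lt {α : Type} (l : List α) (k1 k2 : α → Int) (m : α)
    (h : PySem.List.min2? l k1 k2 = some m) :
    m ∈ l ∧ ∀ y ∈ l, ¬ (k1 y < k1 m ∨ (k1 y = k1 m ∧ k2 y < k2 m)) := by
  have key : ∀ (t : List α) (a : α),
      ∃ m, t.foldl (fun (acc : Option α) (x : α) =>
          match acc with
          | none => some x
          | some m => if (decide (k1 x < k1 m) || !decide (k1 m < k1 x) && decide (k2 x < k2 m)) = true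
                      then some x else some m) (some a) = some m
        ∧ (m = a ∨ m ∈ t)
        ∧ (¬ (k1 a < k1 m ∨ (k1 a = k1 m ∧ k2 a < k2 m)))
        ∧ ∀ y ∈ t, ¬ (k1 y < k1 m ∨ (k1 y = k1 m ∧ k2 y < k2 m)) := by
    intro t
    induction t with
    | nil => intro a; exact ⟨a, rfl, Or.inl rfl, by omega, by simp⟩
    | cons x t ih =>
      intro a
      simp only [List.foldl_cons]
      by_cases hc : (k1 x < k1 a ∨ (k1 x = k1 a ∧ k2 x < k2 a))
      · have hb : (decide (k1 x < k1 a) || !decide (k1 a < k1 x) && decide (k2 x < k2 a)) = true := by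
          simp; omega
        simp only [hb, if_true]
        obtain ⟨m, hm, hmem, hax, hall⟩ := ih x
        refine ⟨m, hm, ?_, by omega, ?_⟩
        · rcases hmem with h | h
          · exact Or.inr (by simp [h])
          · exact Or.inr (by simp [h])
        · intro y hy
          rcases List.mem_cons.mp hy with h | h
          · subst h; omega
          · exact hall y h
      · have hb : (decide (k1 x < k1 a) || !decide (k1 a < k1 x) && decide (k2 x < k2 a)) = false := by
          simp; omega
        simp only [hb, Bool.false_eq_true, if_false]
        obtain ⟨m, hm, hmem, hax, hall⟩ := ih a
        refine ⟨m, hm, ?_, hax, ?_⟩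
        · rcases hmem with h | h
          · exact Or.inl h
          · exact Or.inr (by simp [h])
        · intro y hy
          rcases List.mem_cons.mp hy with h | h
          · subst h; omega
          · exact hall y h
  unfold PySem.List.min2? at h
  cases l with
  | nil => simp at h
  | cons x t =>
    rw [List.foldl_cons] at h
    have h' : List.foldl (fun (acc : Option α) (x : α) =>
        match acc with
        | none => some x
        | some m => if (decide (k1 x < k1 m) || !decide (k1 m < k1 x) && decide (k2 x < k2 m)) = true
                    then some x else some m) (some x) t = some m := h
    obtain ⟨m', hm, hmem, hax, hall⟩ := key t x
    rw [hm] at h'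
    obtain rfl : m' = m := by injection h'
    refine ⟨?_, ?_⟩
    · rcases hmem with h2 | h2
      · simp [h2]
      · simp [h2]
    · intro y hy
      rcases List.mem_cons.mp hy with h2 | h2
      · subst h2; exact hax
      · exact hall y h2

theorem min2?_eq_none_iff {α : Type} (l : List α) (k1 k2 : α → Int) :
    PySem.List.min2? l k1 k2 = none ↔ l = [] := by
  constructor
  · intro h
    cases l with
    | nil => rfl
    | cons x t =>
      exfalso
      have hsome : ∀ (t : List α) (a : α),
          ∃ m, t.foldl (fun (acc : Option α) (x : α) =>
              match acc with
              | none => some x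
              | some m => if (decide (k1 x < k1 m) || !decide (k1 m < k1 x) && decide (k2 x < k2 m)) = true
                          then some x else some m) (some a) = some m := by
        intro t
        induction t with
        | nil => intro a; exact ⟨a, rfl⟩
        | cons x t ih =>
          intro a
          simp only [List.foldl_cons]
          by_cases hc : (k1 x < k1 a ∨ (k1 x = k1 a ∧ k2 x < k2 a))
          · have hb : (decide (k1 x < k1 a) || !decide (k1 a < k1 x) && decide (k2 x < k2 a)) = true := by
              simp; omega
            simp only [hb, if_true]
            exact ih x
          · have hb : (decide (k1 x < k1 a) || !decide (k1 a < k1 x) && decide (k2 x < k2 a)) = false := by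
              simp; omega
            simp only [hb, Bool.false_eq_true, if_false]
            exact ih a
      unfold PySem.List.min2? at h
      rw [List.foldl_cons] at h
      have h' : List.foldl (fun (acc : Option α) (x : α) =>
          match acc with
          | none => some x
          | some m => if (decide (k1 x < k1 m) || !decide (k1 m < k1 x) && decide (k2 x < k2 m)) = true
                      then some x else some m) (some x) t = none := h
      obtain ⟨m, hm⟩ := hsome t x
      rw [hm] at h'
      cases h' 
  · intro h; subst h; rfl

-- min2? is order-independent when the secondary keys separate distinct elements
theorem min2?_perm {α : Type} (l₁ l₂ : List α) (k1 k2 : α → Int)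
    (hp : l₁.Perm l₂)
    (hne : ∀ a ∈ l₁, ∀ b ∈ l₁, a ≠ b → k2 a ≠ k2 b) :
    PySem.List.min2? l₁ k1 k2 = PySem.List.min2? l₂ k1 k2 := by
  cases h1 : PySem.List.min2? l₁ k1 k2 with
  | none =>
    rw [min2?_eq_none_iff] at h1
    have hl2 : l₂ = [] := (List.Perm.nil_eq (h1 ▸ hp)).symm
    rw [hl2]
    rfl
  | some m1 =>
    cases h2 : PySem.List.min2? l₂ k1 k2 with
    | none =>
      rw [min2?_eq_none_iff] at h2
      have hl1 : l₁ = [] := List.Perm.eq_nil (h2 ▸ hp)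
      rw [hl1] at h1
      cases h1
    | some m2 =>
      obtain ⟨hm1, hall1⟩ := min2?_not_lt l₁ k1 k2 m1 h1
      obtain ⟨hm2, hall2⟩ := min2?_not_lt l₂ k1 k2 m2 h2
      by_cases heq : m1 = m2
      · rw [heq]
      · exfalso
        have hm2' : m2 ∈ l₁ := hp.symm.subset hm2
        have hm1' : m1 ∈ l₂ := hp.subset hm1
        have hA := hall1 m2 hm2'
        have hB := hall2 m1 hm1'
        have hk2 : k2 m1 = k2 m2 := by omega
        exact hne m1 hm1 m2 hm2' heq hk2

-- on a list with strictly increasing secondary keys, min2? (-k1, k2) is max? k1 (first-max)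
theorem min2?_eq_max?_of_incr {α : Type} (l : List α) (k1 k2 : α → Int)
    (hinc : l.Pairwise (fun a b => k2 a < k2 b)) :
    PySem.List.min2? l (fun a => -(k1 a)) k2 = PySem.List.max? l k1 := by
  have key : ∀ (t : List α) (a : α), (∀ y ∈ t, k2 a < k2 y) →
      t.Pairwise (fun u v => k2 u < k2 v) →
      t.foldl (fun (acc : Option α) (x : α) =>
          match acc with
          | none => some x
          | some m => if (decide (-k1 x < -k1 m) || !decide (-k1 m < -k1 x) && decide (k2 x < k2 m)) = true
                      then some x else some m) (some a)
        = t.foldl (fun (acc : Option α) (x : α) =>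
          match acc with
          | none => some x
          | some m => if k1 m < k1 x then some x else some m) (some a) := by
    intro t
    induction t with
    | nil => intro a _ _; rfl
    | cons y t ih =>
      intro a hlt hpw
      have hy : k2 a < k2 y := hlt y (by simp)
      simp only [List.foldl_cons]
      by_cases hk : k1 a < k1 y
      · have hb : (decide (-k1 y < -k1 a) || !decide (-k1 a < -k1 y) && decide (k2 y < k2 a)) = true := by
          simp; omega
        simp only [hb, if_true, if_pos hk]
        exact ih y (fun z hz => (List.pairwise_cons.mp hpw).1 z hz) (List.pairwise_cons.mp hpw).2
      · have hb : (decide (-k1 y < -k1 a) || !decide (-k1 a < -k1 y) && decide (k2 y < k2 a)) = false := by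
          simp; omega
        simp only [hb, Bool.false_eq_true, if_false, if_neg hk]
        exact ih a (fun z hz => hlt z (by simp [hz])) (List.pairwise_cons.mp hpw).2
  cases l with
  | nil => rfl
  | cons x t =>
    have hx := List.pairwise_cons.mp hinc
    show List.foldl _ _ t = List.foldl _ _ t
    exact key t x hx.1 hx.2

-- a Pairwise relation applies (one way or the other) to any two distinct members
theorem pairwise_rel_of_mem_ne {α : Type} {R : α → α → Prop} {l : List α}
    (h : l.Pairwise R) {a b : α} (ha : a ∈ l) (hb : b ∈ l) (hne : a ≠ b) :
    R a b ∨ R b a := by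
  induction l with
  | nil => cases ha
  | cons z t ih =>
    rcases List.mem_cons.mp ha with h1 | h1 <;> rcases List.mem_cons.mp hb with h2 | h2
    · exact absurd (h1.trans h2.symm) hne
    · subst h1; exact Or.inl ((List.pairwise_cons.mp h).1 b h2)
    · subst h2; exact Or.inr ((List.pairwise_cons.mp h).1 a h1)
    · exact ih (List.pairwise_cons.mp h).2 h1 h2

-- first-occurrence order: dedup of the key list is ordered by the (strictly increasing) index of first occurrence
theorem dedup_firstIdx_pairwise (l : List (String × Int × List (String × Option String)))
    (hIdx : l.Pairwise (fun s t => s.2.1 < t.2.1)) :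
    (PySem.List.dedup (l.map (fun t => t.1))).Pairwise
      (fun p q => (pvSumP l p).2.1 < (pvSumP l q).2.1) := by
  induction l using List.reverseRecOn with
  | nil => simp [PySem.List.dedup, PySem.Set.ofList]
  | append_singleton l t ih =>
    obtain ⟨hl, -, hcross⟩ := List.pairwise_append.mp hIdx
    -- the head (hence first index) of a pattern group does not move when t is appended
    have hstable : ∀ p, p ∈ l.map (fun t => t.1) →
        (pvSumP (l ++ [t]) p).2.1 = (pvSumP l p).2.1 := by
      intro p hp
      obtain ⟨u, hu, hup⟩ := List.mem_map.mp hp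
      unfold pvSumP
      rw [List.filter_append]
      cases hfil : l.filter (fun s => s.1 == p) with
      | nil =>
        exfalso
        have : u ∈ l.filter (fun s => s.1 == p) := List.mem_filter.mpr ⟨hu, by simp [hup]⟩
        rw [hfil] at this
        cases this
      | cons v g => rfl
    have hdd : PySem.List.dedup ((l ++ [t]).map (fun t => t.1))
        = PySem.Set.add (PySem.List.dedup (l.map (fun t => t.1))) t.1 := by
      simp only [PySem.List.dedup_eq_ofList, List.map_append, List.map_cons, List.map_nil]
      unfold PySem.Set.ofList
      rw [List.foldl_append]
      rfl
    rw [hdd]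
    unfold PySem.Set.add
    by_cases hc : t.1 ∈ PySem.List.dedup (l.map (fun t => t.1))
    · rw [if_pos (by simpa [PySem.List.dedup_eq_ofList] using List.elem_eq_true_of_mem hc)]
      refine List.Pairwise.imp_of_mem ?_ (ih hl)
      intro p q hp hq hrel
      have hp' : p ∈ l.map (fun t => t.1) := by
        exact (PySem.List.mem_dedup _ _).mp hp
      have hq' : q ∈ l.map (fun t => t.1) := by
        exact (PySem.List.mem_dedup _ _).mp hq
      rw [hstable p hp', hstable q hq']
      exact hrel
    · rw [if_neg (by
        intro hcon
        exact hc (by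
          have : t.1 ∈ PySem.List.dedup (l.map (fun s => s.1)) := by
            have := List.mem_of_elem_eq_true hcon
            exact this
          exact this))]
      rw [List.pairwise_append]
      refine ⟨?_, List.pairwise_singleton _ _, ?_⟩
      · refine List.Pairwise.imp_of_mem ?_ (ih hl)
        intro p q hp hq hrel
        have hp' : p ∈ l.map (fun t => t.1) := by
          exact (PySem.List.mem_dedup _ _).mp hp
        have hq' : q ∈ l.map (fun t => t.1) := by
          exact (PySem.List.mem_dedup _ _).mp hq
        rw [hstable p hp', hstable q hq']
        exact hrel
      · intro p hp q hq
        obtain rfl : q = t.1 := by simpa using hq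
        have hp' : p ∈ l.map (fun t => t.1) := by
          exact (PySem.List.mem_dedup _ _).mp hp
        rw [hstable p hp']
        -- the index of t.1's group in l ++ [t] is t.2.1
        have htnew : (pvSumP (l ++ [t]) t.1).2.1 = t.2.1 := by
          unfold pvSumP
          rw [List.filter_append]
          have hnil : l.filter (fun s => s.1 == t.1) = [] := by
            rw [List.filter_eq_nil_iff]
            intro a ha hbeq
            have ha1 : a.1 = t.1 := by simpa using hbeq
            exact hc ((PySem.List.mem_dedup _ _).mpr (List.mem_map.mpr ⟨a, ha, ha1⟩))
          rw [hnil]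
          simp [pvSum]
        rw [htnew]
        -- the head of p's group is an element of l, so its index is below t.2.1
        obtain ⟨u, hu, hup⟩ := List.mem_map.mp hp'
        cases hfil : l.filter (fun s => s.1 == p) with
        | nil =>
          exfalso
          have : u ∈ l.filter (fun s => s.1 == p) := List.mem_filter.mpr ⟨hu, by simp [hup]⟩
          rw [hfil] at this
          cases this
        | cons v g =>
          have hv : v ∈ l := (List.mem_filter.mp (by rw [hfil]; simp : v ∈ l.filter (fun s => s.1 == p))).1
          have : (pvSumP l p).2.1 = v.2.1 := by
            unfold pvSumP
            rw [hfil]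
            rfl
          rw [this]
          exact hcross v hv t (by simp)

-- the summary of pattern p's group carries p's count, first index, pattern and first record
theorem pvSumP_count (l : List (String × Int × List (String × Option String))) (p : String) :
    (pvSumP l p).1 = ((l.map (fun t => t.1)).count p : Int) := by
  have hlen : (pvSumP l p).1 = ((l.filter (fun t => t.1 == p)).length : Int) := by
    unfold pvSumP pvSum
    cases h : l.filter (fun t => t.1 == p) with
    | nil => simp
    | cons u g => simp
  rw [hlen]
  congr 1
  rw [← List.countP_eq_length_filter]
  rw [List.count, List.countP_map]
  rfl

theorem pvSumP_pattern (l : List (String × Int × List (String × Option String))) (p : String)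
    (h : p ∈ l.map (fun t => t.1)) : (pvSumP l p).2.2.1 = p := by
  obtain ⟨u, hu, hup⟩ := List.mem_map.mp h
  have hne : l.filter (fun t => t.1 == p) ≠ [] := by
    intro hnil
    have : u ∈ l.filter (fun t => t.1 == p) := List.mem_filter.mpr ⟨hu, by simp [hup]⟩
    rw [hnil] at this
    cases this
  unfold pvSumP pvSum
  cases hf : l.filter (fun t => t.1 == p) with
  | nil => exact absurd hf hne
  | cons v g =>
    have hv : v ∈ l.filter (fun t => t.1 == p) := by rw [hf]; simp
    have := (List.mem_filter.mp hv).2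
    simpa using this

theorem pvSumP_rec (l : List (String × Int × List (String × Option String))) (p : String)
    (t : String × Int × List (String × Option String))
    (h : l.find? (fun t => t.1 == p) = some t) : (pvSumP l p).2.2.2 = t.2.2 := by
  have hh : (l.filter (fun t => t.1 == p)).head? = some t := by
    rw [List.head?_filter]
    exact h
  unfold pvSumP pvSum
  cases hf : l.filter (fun t => t.1 == p) with
  | nil => rw [hf] at hh; cases hh
  | cons v g =>
    rw [hf] at hh
    obtain rfl : v = t := by injection hh
    rfl

-- the pattern of a nonempty filter group
theorem pvSum_filter_pattern (l : List (String × Int × List (String × Option String))) (p : String)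
    (h : l.filter (fun t => t.1 == p) ≠ []) :
    (pvSum (l.filter (fun t => t.1 == p))).2.2.1 = p := by
  cases hf : l.filter (fun t => t.1 == p) with
  | nil => exact absurd hf h
  | cons v g =>
    have hv : v ∈ l.filter (fun t => t.1 == p) := by rw [hf]; simp
    have := (List.mem_filter.mp hv).2
    simpa [pvSum] using this

-- the groups are empty exactly for absent patterns
theorem filter_pat_eq_nil_iff (l : List (String × Int × List (String × Option String))) (p : String) :
    l.filter (fun t => t.1 == p) = [] ↔ p ∉ l.map (fun t => t.1) := by
  rw [List.filter_eq_nil_iff]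
  constructor
  · intro h hp
    obtain ⟨u, hu, hup⟩ := List.mem_map.mp hp
    exact h u hu (by simp [hup])
  · intro h u hu hbeq
    exact h (List.mem_map.mpr ⟨u, hu, by simpa using hbeq⟩)

-- emptiness of a pattern group, as a Bool
theorem isEmpty_filter_pat (l : List (String × Int × List (String × Option String))) (p : String) :
    (l.filter (fun t => t.1 == p)).isEmpty = !(decide (p ∈ l.map (fun t => t.1))) := by
  by_cases h : p ∈ l.map (fun t => t.1)
  · simp only [h, decide_true, Bool.not_true]
    refine List.isEmpty_eq_false_iff.mpr ?_
    intro hnil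
    exact absurd h ((filter_pat_eq_nil_iff l p).mp hnil)
  · simp only [h, decide_false, Bool.not_false]
    exact List.isEmpty_iff.mpr ((filter_pat_eq_nil_iff l p).mpr h)

-- the heart of the equivalence: both ports compute the same value
theorem final_eq (records : List (List (String × Option String))) :
    dominant_hunter_pattern_py records = dominant_hunter_pattern_py_alt records := by
  unfold dominant_hunter_pattern_py_alt
  rw [A_char records, tl_proj records 0]
  dsimp only
  set tl := (PySem.List.enumerate records 0).filterMap
      (fun q => (patternFor q.2).map (fun p => (p, q.1, q.2))) with htl
  have hpats : (tl.map (fun t => (t.1, t.2.2))).map (fun q => q.1) = tl.map (fun t => t.1) := by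
    simp
  rw [hpats]
  by_cases hemp : tl = []
  · rw [hemp]
    rfl
  · have hmem3 : ∀ t ∈ tl, t.1 = "first.last" ∨ t.1 = "flast" ∨ t.1 = "first" := by
      intro t ht
      rw [htl] at ht
      obtain ⟨q, hq, hsome⟩ := List.mem_filterMap.mp ht
      cases hpf : patternFor q.2 with
      | none => rw [hpf] at hsome; cases hsome
      | some p =>
        rw [hpf] at hsome
        obtain rfl : (p, q.1, q.2) = t := by simpa using hsome
        simpa using patternFor_mem q.2 p hpf
    have hIdxtl : tl.Pairwise (fun s t => s.2.1 < t.2.1) := by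
      rw [htl, List.pairwise_filterMap]
      refine (PySem.List.pairwise_lt_enumerate records 0).imp ?_
      intro a b hab x hx y hy
      cases hpa : patternFor a.2 with
      | none => rw [hpa] at hx; cases hx
      | some pa =>
        rw [hpa] at hx
        cases hpb : patternFor b.2 with
        | none => rw [hpb] at hy; cases hy
        | some pb =>
          rw [hpb] at hy
          obtain rfl : (pa, a.1, a.2) = x := by simpa using hx
          obtain rfl : (pb, b.1, b.2) = y := by simpa using hy
          exact hab
    rw [if_neg (by simp [List.isEmpty_iff, hemp])]
    rw [sort3 tl hmem3]
    -- run compression over the three groups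
    have hall1 : ∀ z ∈ tl.filter (fun t => t.1 == "first"), z.1 = "first" := by
      intro z hz; simpa using (List.mem_filter.mp hz).2
    have hall2 : ∀ z ∈ tl.filter (fun t => t.1 == "first.last"), z.1 = "first.last" := by
      intro z hz; simpa using (List.mem_filter.mp hz).2
    have hall3 : ∀ z ∈ tl.filter (fun t => t.1 == "flast"), z.1 = "flast" := by
      intro z hz; simpa using (List.mem_filter.mp hz).2
    have hruns : ((tl.filter (fun t => t.1 == "first") ++ tl.filter (fun t => t.1 == "first.last"))
          ++ tl.filter (fun t => t.1 == "flast")).foldl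
        (fun (rs : List (Int × Int × String × List (String × Option String))) t =>
          match rs.getLast? with
          | some r => if r.2.2.1 == t.1 then rs.dropLast ++ [(r.1 + 1, r.2.1, r.2.2.1, r.2.2.2)]
                      else rs ++ [((1 : Int), t.2.1, t.1, t.2.2)]
          | none => rs ++ [((1 : Int), t.2.1, t.1, t.2.2)]) []
        = ((if (tl.filter (fun t => t.1 == "first")).isEmpty then []
              else [pvSum (tl.filter (fun t => t.1 == "first"))])
            ++ (if (tl.filter (fun t => t.1 == "first.last")).isEmpty then []
              else [pvSum (tl.filter (fun t => t.1 == "first.last"))]))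
            ++ (if (tl.filter (fun t => t.1 == "flast")).isEmpty then []
              else [pvSum (tl.filter (fun t => t.1 == "flast"))]) := by
      rw [List.foldl_append, List.foldl_append]
      rw [runs_group _ [] "first" hall1 (by intro r hr; simp at hr)]
      rw [runs_group _ _ "first.last" hall2 (by
        intro r hr
        rw [List.nil_append] at hr
        by_cases h1 : (tl.filter (fun t => t.1 == "first")).isEmpty
        · rw [if_pos h1] at hr; simp at hr
        · rw [if_neg h1] at hr
          obtain rfl : pvSum (tl.filter (fun t => t.1 == "first")) = r := by simpa using hr
          rw [pvSum_filter_pattern tl "first" (by simpa [List.isEmpty_iff] using h1)]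
          decide)]
      rw [runs_group _ _ "flast" hall3 (by
        intro r hr
        rw [List.nil_append] at hr
        by_cases h2 : (tl.filter (fun t => t.1 == "first.last")).isEmpty
        · rw [if_pos h2] at hr
          rw [List.append_nil] at hr
          by_cases h1 : (tl.filter (fun t => t.1 == "first")).isEmpty
          · rw [if_pos h1] at hr; simp at hr
          · rw [if_neg h1] at hr
            obtain rfl : pvSum (tl.filter (fun t => t.1 == "first")) = r := by simpa using hr
            rw [pvSum_filter_pattern tl "first" (by simpa [List.isEmpty_iff] using h1)]
            decide
        · rw [if_neg h2, List.getLast?_append] at hr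
          obtain rfl : pvSum (tl.filter (fun t => t.1 == "first.last")) = r := by simpa using hr
          rw [pvSum_filter_pattern tl "first.last" (by simpa [List.isEmpty_iff] using h2)]
          decide)]
      simp
    rw [hruns]
    -- the candidate list is the present patterns, in sorted order, mapped to their summaries
    have hcand : ((if (tl.filter (fun t => t.1 == "first")).isEmpty then []
              else [pvSum (tl.filter (fun t => t.1 == "first"))])
            ++ (if (tl.filter (fun t => t.1 == "first.last")).isEmpty then []
              else [pvSum (tl.filter (fun t => t.1 == "first.last"))]))
            ++ (if (tl.filter (fun t => t.1 == "flast")).isEmpty then []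
              else [pvSum (tl.filter (fun t => t.1 == "flast"))])
        = ((["first", "first.last", "flast"] : List String).filter
            (fun p => decide (p ∈ tl.map (fun t => t.1)))).map (pvSumP tl) := by
      by_cases h1 : "first" ∈ tl.map (fun t => t.1) <;>
        by_cases h2 : "first.last" ∈ tl.map (fun t => t.1) <;>
          by_cases h3 : "flast" ∈ tl.map (fun t => t.1) <;>
            simp [List.filter, h1, h2, h3, isEmpty_filter_pat, pvSumP]
    rw [hcand]
    set S := PySem.List.dedup (tl.map (fun t => t.1)) with hS
    have hSnodup : S.Nodup := PySem.List.nodup_dedup _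
    have hPnodup : (((["first", "first.last", "flast"] : List String).filter
        (fun p => decide (p ∈ tl.map (fun t => t.1))))).Nodup :=
      List.Nodup.filter _ (by decide)
    have hSperm : S.Perm ((["first", "first.last", "flast"] : List String).filter
        (fun p => decide (p ∈ tl.map (fun t => t.1)))) := by
      rw [List.perm_ext_iff_of_nodup hSnodup hPnodup]
      intro p
      rw [hS, PySem.List.mem_dedup, List.mem_filter]
      constructor
      · intro hp
        refine ⟨?_, by simpa using hp⟩
        obtain ⟨u, hu, hup⟩ := List.mem_map.mp hp
        rcases hmem3 u hu with h | h | h <;> simp [← hup, h]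
      · intro hp
        simpa using hp.2
    have hpair : (S.map (pvSumP tl)).Pairwise (fun a b => a.2.1 < b.2.1) :=
      (List.pairwise_map).mpr (dedup_firstIdx_pairwise tl hIdxtl)
    have hne2 : ∀ a ∈ S.map (pvSumP tl), ∀ b ∈ S.map (pvSumP tl), a ≠ b → a.2.1 ≠ b.2.1 := by
      intro a ha b hb hab
      rcases pairwise_rel_of_mem_ne hpair ha hb hab with h | h <;> omega
    have hchain : PySem.List.min2? (((["first", "first.last", "flast"] : List String).filter
          (fun p => decide (p ∈ tl.map (fun t => t.1)))).map (pvSumP tl))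
          (fun r => -r.1) (fun r => r.2.1)
        = (PySem.List.max? S (fun p => ((tl.map (fun t => t.1)).count p : Int))).map (pvSumP tl) := by
      rw [← min2?_perm (S.map (pvSumP tl)) _ _ _ (hSperm.map _) hne2]
      rw [min2?_eq_max?_of_incr (S.map (pvSumP tl)) (fun r => r.1) (fun r => r.2.1) hpair]
      rw [max?_map S (pvSumP tl) (fun r => r.1)]
      have hkey : (fun p => ((pvSumP tl p).1)) = (fun p => ((tl.map (fun t => t.1)).count p : Int)) :=
        funext (pvSumP_count tl)
      rw [hkey]
    rw [hchain]
    -- both sides now select the same dominant pattern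
    have hSne : S ≠ [] := by
      intro hnil
      cases htl' : tl with
      | nil => exact hemp htl'
      | cons u t =>
        have : u.1 ∈ S := by
          rw [hS, PySem.List.mem_dedup]
          exact List.mem_map.mpr ⟨u, by rw [htl']; simp, rfl⟩
        rw [hnil] at this
        cases this
    obtain ⟨d, hd⟩ : ∃ d, PySem.List.max? S (fun p => ((tl.map (fun t => t.1)).count p : Int)) = some d := by
      cases hcase : PySem.List.max? S (fun p => ((tl.map (fun t => t.1)).count p : Int)) with
      | some d => exact ⟨d, rfl⟩
      | none => exact absurd ((PySem.List.max?_eq_none_iff _ _).mp hcase) hSne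
    rw [hd]
    have hdpats : d ∈ tl.map (fun t => t.1) := by
      have := PySem.List.max?_mem hd
      rw [hS, PySem.List.mem_dedup] at this
      exact this
    obtain ⟨u, hu⟩ : ∃ u, tl.find? (fun t => t.1 == d) = some u := by
      obtain ⟨v, hv, hvp⟩ := List.mem_map.mp hdpats
      exact Option.isSome_iff_exists.mp (List.find?_isSome.mpr ⟨v, hv, by simp [hvp]⟩)
    have hfind2 : (tl.map (fun t => (t.1, t.2.2))).find? (fun q => q.1 == d)
        = (tl.find? (fun t => t.1 == d)).map (fun t => (t.1, t.2.2)) := by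
      rw [List.find?_map]
      rfl
    simp only [Option.map_some]
    rw [hfind2, hu]
    rw [pvSumP_pattern tl d hdpats, pvSumP_rec tl d u hu]
    rfl

-- ===== VERDICT (by name: the statement is the Claim_ definition above) =====
theorem dominant_hunter_pattern_py_spec : Claim_equal_dominant_hunter_pattern_py := by
  intro records _
  unfold Spec_dominant_hunter_pattern_py
  exact final_eq records
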